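-- pv_equiv track=rewrite | github.com/hjungj21o/Interview-DS-A | lc_bloomberg.py/1209_remove_all_adjacent_duplicates_in_str_ii.py | candy_crush2
-- ===== SOURCE A (Python) =====
-- def candy_crush2(s):
--     stack = []
--
--     for char in s:
--         if stack and stack[-1][0] == char:
--             stack[-1][1] += 1
--         else:
--             if stack and stack[-1][1] >= 3:
--                 stack.pop()
--             if stack and stack[-1][0] == char:
--                 stack[-1][1] += 1
--             else:
--                 stack.append([char, 1])
--
--     if stack[-1][1] >= 3:
--         stack.pop()
--
--     res = []
--     for char, num in stack:
--         res.append(char * num)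
--     return "".join(res)
-- ===== SOURCE B (Python) =====
-- def candy_crush2(s):
--     # Repeatedly delete the first maximal run of >= 3 equal characters and
--     # rescan, until no such run remains (fixed-point removal, no stack).
--     while True:
--         n = len(s)
--         i = 0
--         found = False
--         while i < n:
--             j = i + 1
--             while j < n and s[j] == s[i]:
--                 j += 1
--             if j - i >= 3:
--                 s = s[:i] + s[j:]
--                 found = True
--                 break
--             i = j
--         if not found:
--             return s
-- ===== Notes on version B (the rewrite author's own statement) =====
-- stated objective: alternative
-- what changed: B repeatedly scans the string for the first maximal run of >=3 equal characters, deletes it and rescans until no such run remains (fixed-point deletion, no stack of counts), instead of A's single-pass stack of [char,count] with lazy pops.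
import Mathlib
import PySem

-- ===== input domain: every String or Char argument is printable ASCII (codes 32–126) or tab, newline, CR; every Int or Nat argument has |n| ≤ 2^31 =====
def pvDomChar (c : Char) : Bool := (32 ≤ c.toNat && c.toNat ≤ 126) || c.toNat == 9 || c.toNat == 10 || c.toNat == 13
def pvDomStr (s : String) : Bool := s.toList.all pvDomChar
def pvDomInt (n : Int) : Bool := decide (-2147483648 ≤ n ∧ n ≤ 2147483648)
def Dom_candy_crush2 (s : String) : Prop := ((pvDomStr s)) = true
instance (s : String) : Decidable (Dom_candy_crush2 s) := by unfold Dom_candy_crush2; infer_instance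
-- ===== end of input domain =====

-- B repeatedly deletes the first maximal run of >= 3 equal characters until none
-- remains (fixed-point deletion) instead of A's one-pass stack of counts
-- (objective: alternative algorithm). A raises IndexError on "", excluded by Pre_.

-- ===== PORT A =====
-- stack is kept head-first (head = Python's stack[-1]); counts are Python ints.
def ccStepA (stack : List (Char × Int)) (c : Char) : List (Char × Int) :=
  match stack with
  | (c0, n0) :: rest =>
    if c0 == c then (c0, n0 + 1) :: rest
    else
      let stack' := if n0 ≥ 3 then rest else stack
      match stack' with
      | (c1, n1) :: rest' => if c1 == c then (c1, n1 + 1) :: rest' else (c, 1) :: stack'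
      | [] => [(c, 1)]
  | [] => [(c, 1)]

def ccRenderA (stack : List (Char × Int)) : String :=
  String.join (stack.reverse.map (fun p => String.ofList (List.replicate p.2.toNat p.1)))

def candy_crush2 (s : String) : String :=
  let stack := s.toList.foldl ccStepA []
  match stack with
  | (c0, n0) :: rest => ccRenderA (if n0 ≥ 3 then rest else (c0, n0) :: rest)
  | [] => ""  -- Python raises IndexError here (stack[-1] on empty stack); outside Pre_

-- ===== PORT B =====
-- ccSpan c xs = (number of leading copies of c in xs, remainder) — the inner `while s[j] == s[i]` scan
def ccSpan (c : Char) : List Char → Nat × List Char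
  | [] => (0, [])
  | x :: xs => if x == c then ((ccSpan c xs).1 + 1, (ccSpan c xs).2) else (0, x :: xs)

theorem ccSpan_len_eq (c : Char) (xs : List Char) :
    (ccSpan c xs).1 + (ccSpan c xs).2.length = xs.length := by
  induction xs with
  | nil => simp [ccSpan]
  | cons x xs ih =>
    by_cases h : x == c
    · simp only [ccSpan, h, if_true, List.length_cons]; omega
    · simp [ccSpan, h]

theorem ccSpan_len (c : Char) (xs : List Char) : (ccSpan c xs).2.length ≤ xs.length := by
  have := ccSpan_len_eq c xs; omega

-- the middle `while i < n` scan: find the first maximal run of length ≥ 3 and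
-- return the string with it removed, or none if there is no such run
def ccFind : List Char → Option (List Char)
  | [] => none
  | x :: xs =>
    if (ccSpan x xs).1 + 1 ≥ 3 then some (ccSpan x xs).2
    else
      match ccFind (ccSpan x xs).2 with
      | none => none
      | some r => some (x :: (List.replicate (ccSpan x xs).1 x ++ r))
termination_by l => l.length
decreasing_by simpa using Nat.lt_succ_of_le (ccSpan_len x xs)

theorem ccFind_len : ∀ (l r : List Char), ccFind l = some r → r.length < l.length := by
  intro l
  induction l using ccFind.induct with
  | case1 => intro r h; simp [ccFind] at h
  | case2 x xs hge =>
    intro r h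
    simp only [ccFind, if_pos hge] at h
    cases h
    exact Nat.lt_succ_of_le (ccSpan_len x xs)
  | case3 x xs hge hnone =>
    intro r h
    simp only [ccFind, hnone] at h
    rw [if_neg hge] at h
    exact absurd h (by simp)
  | case4 x xs hge r' hsome ih =>
    intro r h
    simp only [ccFind, if_neg hge, hsome] at h
    cases h
    have h1 := ih r' hsome
    have h2 := ccSpan_len_eq x xs
    simp only [List.length_cons, List.length_append, List.length_replicate]
    omega

-- the outer `while True` loop
def ccCrush (l : List Char) : List Char :=
  match h : ccFind l with
  | none => l
  | some r => ccCrush r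
termination_by l.length
decreasing_by exact ccFind_len _ _ h

def candy_crush2_alt (s : String) : String := String.ofList (ccCrush s.toList)

-- ===== PRECONDITION & SPEC =====
-- Pre_ excludes exactly the empty string, on which A raises IndexError at stack[-1].
def Pre_candy_crush2 (s : String) : Prop := s ≠ ""
instance (s : String) : Decidable (Pre_candy_crush2 s) := by unfold Pre_candy_crush2; infer_instance
def pvWitness_candy_crush2 : String := "a"

def Spec_candy_crush2 (s : String) (out : String) : Prop := out = candy_crush2_alt s
instance (s : String) (out : String) : Decidable (Spec_candy_crush2 s out) := by unfold Spec_candy_crush2; infer_instance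

-- ===== CLAIM (what is proved, stated in full; the proofs are below) =====
def Claim_equal_candy_crush2 : Prop := ∀ (s : String), Dom_candy_crush2 s → Pre_candy_crush2 s → Spec_candy_crush2 s (candy_crush2 s)

-- ===== LEMMAS AND PROOFS =====

-- pop the top entry iff its count is ≥ 3 (A's final step)
def ccAfterPop : List (Char × Int) → List (Char × Int)
  | (c, n) :: rest => if n ≥ 3 then rest else (c, n) :: rest
  | [] => []

theorem candy_crush2_eq (s : String) :
    candy_crush2 s = ccRenderA (ccAfterPop (s.toList.foldl ccStepA [])) := by
  unfold candy_crush2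
  cases h : s.toList.foldl ccStepA [] with
  | nil => simp [ccAfterPop, ccRenderA, String.join]
  | cons p rest => cases p; simp [ccAfterPop]

-- every buried/considered count < 3
def ccLT3 (S : List (Char × Int)) : Prop := ∀ p ∈ S, p.2 < 3

-- top of the stack carries a character ≠ x (or stack empty)
def ccTopNe (S : List (Char × Int)) (x : Char) : Prop :=
  match S with
  | (c, _) :: _ => c ≠ x
  | [] => True

theorem ccStepA_push (S : List (Char × Int)) (x : Char) (h3 : ccLT3 S) (hne : ccTopNe S x) :
    ccStepA S x = (x, 1) :: S := by
  cases S with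
  | nil => rfl
  | cons p rest =>
    obtain ⟨c0, n0⟩ := p
    have hc : c0 ≠ x := hne
    have hn : n0 < 3 := h3 (c0, n0) (List.mem_cons_self ..)
    have hn' : ¬ (3 : Int) ≤ n0 := by omega
    simp [ccStepA, hc, hn']

theorem ccStepA_run (k : Nat) (x : Char) (m : Int) (S : List (Char × Int)) :
    List.foldl ccStepA ((x, m) :: S) (List.replicate k x) = (x, m + k) :: S := by
  induction k generalizing m with
  | zero => simp
  | succ k ih =>
    simp only [List.replicate_succ, List.foldl_cons]
    have : ccStepA ((x, m) :: S) x = (x, m + 1) :: S := by simp [ccStepA]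
    rw [this, ih]
    congr 1
    push_cast
    ring_nf

theorem ccStepA_popMerge (x y : Char) (n : Int) (S : List (Char × Int))
    (hxy : x ≠ y) (hn : n ≥ 3) (h3 : ccLT3 S) : ccStepA ((x, n) :: S) y = ccStepA S y := by
  cases S with
  | nil => simp [ccStepA, hxy, hn]
  | cons p rest =>
    obtain ⟨c1, n1⟩ := p
    have h13 : ¬ (3 : Int) ≤ n1 := by
      have := h3 (c1, n1) (List.mem_cons_self ..); simp at this; omega
    by_cases h1 : c1 = y
    · simp [ccStepA, hxy, hn, h1]
    · simp [ccStepA, hxy, hn, h1, h13]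

theorem ccSpan_decomp (c : Char) (xs : List Char) :
    xs = List.replicate (ccSpan c xs).1 c ++ (ccSpan c xs).2 := by
  induction xs with
  | nil => rfl
  | cons x xs ih =>
    by_cases h : x == c
    · have hx : x = c := by simpa using h
      subst hx
      simp only [ccSpan, h, if_true, List.replicate_succ, List.cons_append]
      exact congrArg (x :: ·) ih
    · simp [ccSpan, h]

theorem ccSpan_head (c : Char) (xs : List Char) (y : Char) (ys : List Char)
    (h : (ccSpan c xs).2 = y :: ys) : y ≠ c := by
  induction xs with
  | nil => simp [ccSpan] at h
  | cons x xs ih =>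
    by_cases hx : x == c
    · simp only [ccSpan, hx, if_true] at h
      exact ih h
    · simp only [ccSpan, hx] at h
      cases h
      simpa using hx

-- deleting the first ≥3-run does not change A's stack after the final pop
theorem ccFind_fold (n : Nat) : ∀ (l : List Char), l.length ≤ n → ∀ (r : List Char)
    (S : List (Char × Int)), ccFind l = some r → ccLT3 S →
    (∀ x xs, l = x :: xs → ccTopNe S x) →
    ccAfterPop (List.foldl ccStepA S l) = ccAfterPop (List.foldl ccStepA S r) := by
  induction n with
  | zero =>
    intro l hl r S hfind _ _
    have : l = [] := List.eq_nil_of_length_eq_zero (Nat.le_zero.mp hl)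
    subst this; simp [ccFind] at hfind
  | succ n ih =>
    intro l hl r S hfind h3 htop
    cases l with
    | nil => simp [ccFind] at hfind
    | cons x xs =>
      have htopx : ccTopNe S x := htop x xs rfl
      have hdec := ccSpan_decomp x xs
      set k := (ccSpan x xs).1 with hk
      set rest := (ccSpan x xs).2 with hrest
      have hfold : List.foldl ccStepA S (x :: xs) = List.foldl ccStepA ((x, 1 + k) :: S) rest := by
        conv_lhs => rw [hdec]
        rw [List.foldl_cons, ccStepA_push S x h3 htopx, List.foldl_append, ccStepA_run]
      by_cases hge : k + 1 ≥ 3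
      · -- the first run is the deleted one
        have hr : r = rest := by
          simp only [ccFind, ← hk, ← hrest, if_pos hge] at hfind
          exact (Option.some_inj.mp hfind).symm
        subst hr
        cases hrsplit : rest with
        | nil =>
          rw [hfold, hrsplit]
          simp only [List.foldl_nil]
          have h13 : (1 : Int) + k ≥ 3 := by omega
          simp only [ccAfterPop, if_pos h13]
          cases S with
          | nil => rfl
          | cons p rest' =>
            obtain ⟨c0, n0⟩ := p
            have : n0 < 3 := h3 (c0, n0) (List.mem_cons_self ..)
            have hn' : ¬ (3 : Int) ≤ n0 := by omega
            simp [hn']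
        | cons y ys =>
          have hyx : y ≠ x := ccSpan_head x xs y ys (by rw [← hrest, hrsplit])
          rw [hfold, hrsplit]
          simp only [List.foldl_cons]
          rw [ccStepA_popMerge x y (1 + k) S (fun h => hyx h.symm) (by omega) h3]
      · -- the first run stays; recurse on the remainder
        obtain ⟨r', hr', hrr⟩ : ∃ r', ccFind rest = some r' ∧ r = x :: (List.replicate k x ++ r') := by
          simp only [ccFind, ← hk, ← hrest, if_neg hge] at hfind
          cases hf : ccFind rest with
          | none => rw [hf] at hfind; simp at hfind
          | some r' => rw [hf] at hfind; exact ⟨r', rfl, (Option.some_inj.mp hfind).symm⟩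
        have hrestlen : rest.length ≤ n := by
          have h2 := ccSpan_len x xs
          simp only [List.length_cons] at hl
          rw [hrest]
          omega
        have h3' : ccLT3 ((x, 1 + k) :: S) := by
          intro p hp
          rcases List.mem_cons.mp hp with h | h
          · subst h; simp only; omega
          · exact h3 p h
        have htop' : ∀ y ys, rest = y :: ys → ccTopNe ((x, 1 + k) :: S) y := by
          intro y ys hy
          exact fun h => (ccSpan_head x xs y ys (hrest ▸ hy)) h.symm
        have IH := ih rest hrestlen r' ((x, 1 + k) :: S) hr' h3' htop'
        rw [hfold, IH, hrr]
        simp only [List.foldl_cons, ccStepA_push S x h3 htopx, List.foldl_append, ccStepA_run]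

theorem ccRepl_cons (k : Nat) (x : Char) (rest : List Char) :
    List.replicate (1 + k) x ++ rest = x :: (List.replicate k x ++ rest) := by
  rw [Nat.add_comm, List.replicate_succ]
  simp

theorem ccJoin_append (as : List String) (b : String) :
    String.join (as ++ [b]) = String.join as ++ b := by
  induction as with
  | nil => simp [String.join]
  | cons a as ih => simp [String.join] at *

-- when no ≥3-run exists, A pushes exactly the runs of l and renders back l
theorem ccNoRun (n : Nat) : ∀ (l : List Char), l.length ≤ n → ccFind l = none →
    ∀ (S : List (Char × Int)), ccLT3 S → (∀ x xs, l = x :: xs → ccTopNe S x) →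
    ccLT3 (List.foldl ccStepA S l) ∧
      ccRenderA (List.foldl ccStepA S l) = ccRenderA S ++ String.ofList l := by
  induction n with
  | zero =>
    intro l hl _ S h3 _
    have : l = [] := List.eq_nil_of_length_eq_zero (Nat.le_zero.mp hl)
    subst this
    refine ⟨h3, ?_⟩
    simp [String.append_empty]
  | succ n ih =>
    intro l hl hfind S h3 htop
    cases l with
    | nil =>
      refine ⟨h3, ?_⟩
      simp [String.append_empty]
    | cons x xs =>
      have htopx : ccTopNe S x := htop x xs rfl
      have hdec := ccSpan_decomp x xs
      set k := (ccSpan x xs).1 with hk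
      set rest := (ccSpan x xs).2 with hrest
      have hcc : ccFind (x :: xs) = if k + 1 ≥ 3 then some rest
          else match ccFind rest with
            | none => none
            | some r => some (x :: (List.replicate k x ++ r)) := by
        rw [ccFind]
      have hge : ¬ (k + 1 ≥ 3) := by
        intro hge
        rw [hcc, if_pos hge] at hfind
        simp at hfind
      have hr' : ccFind rest = none := by
        cases hf : ccFind rest with
        | none => rfl
        | some r' =>
          rw [hcc, if_neg hge, hf] at hfind
          simp at hfind
      have hfold : List.foldl ccStepA S (x :: xs) = List.foldl ccStepA ((x, 1 + k) :: S) rest := by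
        conv_lhs => rw [hdec]
        rw [List.foldl_cons, ccStepA_push S x h3 htopx, List.foldl_append, ccStepA_run]
      have hrestlen : rest.length ≤ n := by
        have h2 := ccSpan_len x xs
        simp only [List.length_cons] at hl
        rw [hrest]
        omega
      have h3' : ccLT3 ((x, 1 + k) :: S) := by
        intro p hp
        rcases List.mem_cons.mp hp with h | h
        · subst h; simp only; omega
        · exact h3 p h
      have htop' : ∀ y ys, rest = y :: ys → ccTopNe ((x, 1 + k) :: S) y := by
        intro y ys hy
        exact fun h => (ccSpan_head x xs y ys (hrest ▸ hy)) h.symm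
      obtain ⟨IH3, IHr⟩ := ih rest hrestlen hr' ((x, 1 + k) :: S) h3' htop'
      refine ⟨by rw [hfold]; exact IH3, ?_⟩
      rw [hfold, IHr]
      have hrx : ccRenderA ((x, 1 + (k : Int)) :: S) =
          ccRenderA S ++ String.ofList (List.replicate (1 + k) x) := by
        simp only [ccRenderA, List.reverse_cons, List.map_append, List.map_cons, List.map_nil]
        rw [ccJoin_append]
        have ht : ((1 : Int) + (k : Int)).toNat = 1 + k := by omega
        rw [ht]
      rw [hrx, String.append_assoc, ← String.ofList_append, ccRepl_cons, ← hdec]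

theorem ccAfterPop_lt3 (S : List (Char × Int)) (h3 : ccLT3 S) : ccAfterPop S = S := by
  cases S with
  | nil => rfl
  | cons p rest =>
    obtain ⟨c, n⟩ := p
    have : n < 3 := h3 (c, n) (List.mem_cons_self ..)
    have hn' : ¬ (3 : Int) ≤ n := by omega
    simp [ccAfterPop, hn']

theorem ccCrush_eq : ∀ (l : List Char),
    ccRenderA (ccAfterPop (List.foldl ccStepA [] l)) = String.ofList (ccCrush l) := by
  intro l
  induction l using ccCrush.induct with
  | case1 l hnone =>
    rw [ccCrush, hnone]
    obtain ⟨h3, hr⟩ := ccNoRun l.length l le_rfl hnone [] (by intro p hp; simp at hp)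
      (by intro x xs _; trivial)
    rw [ccAfterPop_lt3 _ h3, hr]
    simp [ccRenderA, String.join]
  | case2 l r hsome ih =>
    rw [ccCrush, hsome]
    rw [ccFind_fold l.length l le_rfl r [] hsome (by intro p hp; simp at hp)
      (by intro x xs _; trivial)]
    · exact ih
theorem candy_crush2_spec : Claim_equal_candy_crush2 := by
  intro s _ _
  unfold Spec_candy_crush2 candy_crush2_alt
  rw [candy_crush2_eq, ccCrush_eq]
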